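-- pv_equiv track=rewrite | github.com/sciknow-io/skillful-alhazen | src/skillful_alhazen/utils/schema_diff.py | _split_clauses
-- ===== SOURCE A (Python) =====
-- def _split_clauses(text: str) -> list[str]:
--     """Split comma-separated clauses, not splitting inside parentheses."""
--     clauses: list[str] = []
--     depth = 0
--     current: list[str] = []
--     for ch in text:
--         if ch == "(":
--             depth += 1
--             current.append(ch)
--         elif ch == ")":
--             depth -= 1
--             current.append(ch)
--         elif ch == "," and depth == 0:
--             clauses.append("".join(current).strip())
--             current = []
--         else:
--             current.append(ch)
--     final = "".join(current).strip()
--     if final: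
--         clauses.append(final)
--     return clauses
-- ===== SOURCE B (Python) =====
-- def _split_clauses(text: str) -> list[str]:
--     """Split comma-separated clauses, not splitting inside parentheses."""
--     bounds: list[int] = []
--     depth = 0
--     for i, ch in enumerate(text):
--         if ch == "(":
--             depth += 1
--         elif ch == ")":
--             depth -= 1
--         elif ch == "," and depth == 0:
--             bounds.append(i)
--     clauses: list[str] = []
--     start = 0
--     for b in bounds:
--         clauses.append(text[start:b].strip())
--         start = b + 1
--     last = text[start:].strip()
--     if last:
--         clauses.append(last)
--     return clauses
-- ===== Notes on version B (the rewrite author's own statement) =====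
-- stated objective: alternative
-- what changed: Replaces per-character accumulation of the current clause with a two-phase scheme: one depth-tracking pass collects the indices of top-level commas, then a second pass slices each clause out of the original string between consecutive boundaries and strips it.
import Mathlib
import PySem

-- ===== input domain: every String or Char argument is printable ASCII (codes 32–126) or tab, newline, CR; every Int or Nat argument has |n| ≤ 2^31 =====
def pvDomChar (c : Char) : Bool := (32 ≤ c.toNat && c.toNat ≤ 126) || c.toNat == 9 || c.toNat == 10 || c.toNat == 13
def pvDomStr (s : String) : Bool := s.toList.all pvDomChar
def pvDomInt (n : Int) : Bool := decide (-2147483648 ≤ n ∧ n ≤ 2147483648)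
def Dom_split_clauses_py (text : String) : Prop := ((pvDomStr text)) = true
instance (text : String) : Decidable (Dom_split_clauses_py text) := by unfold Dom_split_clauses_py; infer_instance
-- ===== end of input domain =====

-- B replaces A's per-character clause accumulation by collecting top-level comma indices
-- and slicing the clauses out of the original string (objective: alternative decomposition).

-- ===== PORT A =====
-- one step of A's character loop: state = (clauses, depth, current)
def pvStepA (st : List String × Int × List Char) (ch : Char) : List String × Int × List Char :=
  if ch = '(' then (st.1, st.2.1 + 1, st.2.2 ++ [ch])
  else if ch = ')' then (st.1, st.2.1 - 1, st.2.2 ++ [ch])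
  else if ch = ',' ∧ st.2.1 = 0 then (st.1 ++ [String.ofList (PySem.Chars.strip st.2.2)], st.2.1, [])
  else (st.1, st.2.1, st.2.2 ++ [ch])

def split_clauses_py (text : String) : List String :=
  let r := text.toList.foldl pvStepA ([], 0, [])
  let fin := PySem.Chars.strip r.2.2
  if fin ≠ [] then r.1 ++ [String.ofList fin] else r.1

-- ===== PORT B =====
-- one step of B's first loop: state = (bounds, depth), p = (index, char) from enumerate
def pvStepBounds (st : List Int × Int) (p : Int × Char) : List Int × Int :=
  if p.2 = '(' then (st.1, st.2 + 1)
  else if p.2 = ')' then (st.1, st.2 - 1)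
  else if p.2 = ',' ∧ st.2 = 0 then (st.1 ++ [p.1], st.2)
  else st

-- one step of B's second loop over the bounds: state = (clauses, start)
def pvStepSlice (full : List Char) (st : List String × Int) (b : Int) : List String × Int :=
  (st.1 ++ [String.ofList (PySem.Chars.strip (PySem.List.slice full (some st.2) (some b)))], b + 1)

def split_clauses_py_alt (text : String) : List String :=
  let tl := text.toList
  let bst := (PySem.List.enumerate tl 0).foldl pvStepBounds ([], 0)
  let ps := bst.1.foldl (pvStepSlice tl) ([], 0)
  let last := PySem.Chars.strip (PySem.List.slice tl (some ps.2) none)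
  if last ≠ [] then ps.1 ++ [String.ofList last] else ps.1

-- ===== PRECONDITION & SPEC =====
def Spec_split_clauses_py (text : String) (out : List String) : Prop := out = split_clauses_py_alt text
instance (text : String) (out : List String) : Decidable (Spec_split_clauses_py text out) := by unfold Spec_split_clauses_py; infer_instance

-- ===== CLAIM (what is proved, stated in full; the proofs are below) =====
def Claim_equal_split_clauses_py : Prop := ∀ (text : String), Dom_split_clauses_py text → Spec_split_clauses_py text (split_clauses_py text)

-- ===== LEMMAS AND PROOFS =====

-- common specification: (completed segments, trailing partial segment) of a char list
def pvAttach (cur : List Char) (x : List (List Char) × List Char) : List (List Char) × List Char :=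
  match x with
  | ([], l) => ([], cur ++ l)
  | (p :: pr, l) => ((cur ++ p) :: pr, l)

def pvSegs : Int → List Char → List (List Char) × List Char
  | _, [] => ([], [])
  | d, c :: cs =>
    if c = '(' then pvAttach [c] (pvSegs (d + 1) cs)
    else if c = ')' then pvAttach [c] (pvSegs (d - 1) cs)
    else if c = ',' ∧ d = 0 then ([] :: (pvSegs 0 cs).1, (pvSegs 0 cs).2)
    else pvAttach [c] (pvSegs d cs)

def pvBal : List Char → Int
  | [] => 0
  | c :: cs => (if c = '(' then 1 else if c = ')' then (-1) else 0) + pvBal cs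

def pvRelB : Int → List Char → List Nat
  | _, [] => []
  | d, c :: cs =>
    if c = '(' then (pvRelB (d + 1) cs).map (· + 1)
    else if c = ')' then (pvRelB (d - 1) cs).map (· + 1)
    else if c = ',' ∧ d = 0 then 0 :: (pvRelB 0 cs).map (· + 1)
    else (pvRelB d cs).map (· + 1)

def pvMkStrip (s : List Char) : String := String.ofList (PySem.Chars.strip s)

lemma pvAttach_nil (x : List (List Char) × List Char) : pvAttach [] x = x := by
  obtain ⟨ps, l⟩ := x; cases ps <;> simp [pvAttach]

lemma pvAttach_attach (a b : List Char) (x : List (List Char) × List Char) :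
    pvAttach a (pvAttach b x) = pvAttach (a ++ b) x := by
  obtain ⟨ps, l⟩ := x; cases ps <;> simp [pvAttach]

lemma pvSegs_suffix (t : List Char) : ∀ d : Int,
    (pvSegs d t).2 <:+ t ∧ ((pvSegs d t).1 = [] → (pvSegs d t).2 = t) := by
  induction t with
  | nil => intro d; simp [pvSegs]
  | cons c cs ih =>
    intro d
    simp only [pvSegs]
    split_ifs with h1 h2 h3
    · obtain ⟨hs, he⟩ := ih (d + 1)
      rcases hx : pvSegs (d + 1) cs with ⟨ps, l⟩
      cases ps with
      | nil =>
        have : l = cs := by have := he; rw [hx] at this; simpa using this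
        subst this; simp [pvAttach]
      | cons p pr =>
        constructor
        · have : l <:+ cs := by rw [hx] at hs; simpa using hs
          exact this.trans (List.suffix_cons c cs)
        · intro h; simp [pvAttach] at h
    · obtain ⟨hs, he⟩ := ih (d - 1)
      rcases hx : pvSegs (d - 1) cs with ⟨ps, l⟩
      cases ps with
      | nil =>
        have : l = cs := by have := he; rw [hx] at this; simpa using this
        subst this; simp [pvAttach]
      | cons p pr =>
        constructor
        · have : l <:+ cs := by rw [hx] at hs; simpa using hs
          exact this.trans (List.suffix_cons c cs)
        · intro h; simp [pvAttach] at h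
    · obtain ⟨hs, _⟩ := ih 0
      exact ⟨hs.trans (List.suffix_cons c cs), by intro h; simp at h⟩
    · obtain ⟨hs, he⟩ := ih d
      rcases hx : pvSegs d cs with ⟨ps, l⟩
      cases ps with
      | nil =>
        have : l = cs := by have := he; rw [hx] at this; simpa using this
        subst this; simp [pvAttach]
      | cons p pr =>
        constructor
        · have : l <:+ cs := by rw [hx] at hs; simpa using hs
          exact this.trans (List.suffix_cons c cs)
        · intro h; simp [pvAttach] at h

lemma pvA_inv (t : List Char) : ∀ (cl : List String) (d : Int) (cur : List Char),
    t.foldl pvStepA (cl, d, cur)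
      = (cl ++ (pvAttach cur (pvSegs d t)).1.map pvMkStrip, d + pvBal t,
         (pvAttach cur (pvSegs d t)).2) := by
  induction t with
  | nil => intro cl d cur; simp [pvSegs, pvBal]; cases cur <;> simp [pvAttach]
  | cons c cs ih =>
    intro cl d cur
    simp only [List.foldl_cons, pvStepA, pvSegs, pvBal]
    split_ifs with h1 h2 h3
    · rw [ih, pvAttach_attach, show d + 1 + pvBal cs = d + (1 + pvBal cs) by ring]
    · rw [ih, pvAttach_attach, show d - 1 + pvBal cs = d + (-1 + pvBal cs) by ring]
    · obtain ⟨hc3, hd⟩ := h3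
      subst hd
      rw [ih, pvAttach_nil]
      rcases hx : pvSegs 0 cs with ⟨ps, l⟩
      simp [pvAttach, pvMkStrip]
    · rw [ih, pvAttach_attach, show d + pvBal cs = d + (0 + pvBal cs) by ring]

lemma pvB_bounds (t : List Char) : ∀ (s : Nat) (acc : List Int) (d : Int),
    (PySem.List.enumerate t (s : Int)).foldl pvStepBounds (acc, d)
      = (acc ++ (pvRelB d t).map (fun k => ((s + k : Nat) : Int)), d + pvBal t) := by
  induction t with
  | nil => intro s acc d; simp [PySem.List.enumerate_nil, pvRelB, pvBal]
  | cons c cs ih =>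
    intro s acc d
    rw [PySem.List.enumerate_cons]
    simp only [List.foldl_cons, pvStepBounds, pvRelB, pvBal]
    have hc : ((s : Int) + 1) = ((s + 1 : Nat) : Int) := by push_cast; ring
    split_ifs with h1 h2 h3
    · rw [hc, ih]
      simp only [Prod.mk.injEq]
      refine ⟨?_, by ring⟩
      congr 1; rw [List.map_map]
      exact List.map_congr_left (fun k _ => by simp only [Function.comp_apply]; push_cast; ring)
    · rw [hc, ih]
      simp only [Prod.mk.injEq]
      refine ⟨?_, by ring⟩
      congr 1; rw [List.map_map]
      exact List.map_congr_left (fun k _ => by simp only [Function.comp_apply]; push_cast; ring)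
    · obtain ⟨hc3, hd⟩ := h3
      subst hd
      rw [hc, ih]
      simp only [Prod.mk.injEq]
      refine ⟨?_, by ring⟩
      simp only [List.append_assoc]
      congr 1
      rw [List.map_cons, List.map_map]
      simp only [List.singleton_append]
      congr 1
      exact List.map_congr_left (fun k _ => by simp only [Function.comp_apply]; push_cast; ring)
    · rw [hc, ih]
      simp only [Prod.mk.injEq]
      refine ⟨?_, by ring⟩
      congr 1; rw [List.map_map]
      exact List.map_congr_left (fun k _ => by simp only [Function.comp_apply]; push_cast; ring)

lemma pvB_slices (full : List Char) : ∀ (rest : List Char) (d : Int) (pre cur : List Char)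
    (parts : List String), full = pre ++ (cur ++ rest) →
    ((pvRelB d rest).map (fun k => ((pre.length + cur.length + k : Nat) : Int))).foldl
        (pvStepSlice full) (parts, (pre.length : Int))
      = (parts ++ (pvAttach cur (pvSegs d rest)).1.map pvMkStrip,
         ((full.length - (pvAttach cur (pvSegs d rest)).2.length : Nat) : Int)) := by
  intro rest
  induction rest with
  | nil =>
    intro d pre cur parts hf
    subst hf
    rcases hcur : cur with _ | ⟨x, xs⟩ <;>
      simp [pvRelB, pvSegs, pvAttach]
  | cons c cs ih =>
    intro d pre cur parts hf
    simp only [pvRelB, pvSegs]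
    split_ifs with h1 h2 h3
    · -- '(' goes into the current segment
      have hih := ih (d + 1) pre (cur ++ [c]) parts (by rw [hf]; simp)
      rw [List.map_map]
      have hfn : ((fun k => ((pre.length + cur.length + k : Nat) : Int)) ∘ (· + 1))
          = (fun k => ((pre.length + (cur ++ [c]).length + k : Nat) : Int)) := by
        funext k
        simp only [Function.comp_apply, List.length_append, List.length_cons, List.length_nil]
        congr 1
        omega
      rw [hfn]
      simpa [pvAttach_attach] using hih
    · have hih := ih (d - 1) pre (cur ++ [c]) parts (by rw [hf]; simp)
      rw [List.map_map]
      have hfn : ((fun k => ((pre.length + cur.length + k : Nat) : Int)) ∘ (· + 1))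
          = (fun k => ((pre.length + (cur ++ [c]).length + k : Nat) : Int)) := by
        funext k
        simp only [Function.comp_apply, List.length_append, List.length_cons, List.length_nil]
        congr 1
        omega
      rw [hfn]
      simpa [pvAttach_attach] using hih
    · -- top-level comma at absolute index pre.length + cur.length
      obtain ⟨hc3, hd⟩ := h3
      subst hd
      rw [List.map_cons, List.foldl_cons]
      have hslice : PySem.List.slice full (some ((pre.length : Nat) : Int))
            (some ((pre.length + cur.length + 0 : Nat) : Int)) = cur := by
        rw [PySem.List.slice_natCast, hf]
        rw [List.drop_left]
        rw [show pre.length + cur.length + 0 - pre.length = cur.length by omega]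
        exact List.take_left
      have hstep : pvStepSlice full (parts, (pre.length : Int))
            ((pre.length + cur.length + 0 : Nat) : Int)
          = (parts ++ [pvMkStrip cur], ((pre.length + cur.length + 0 : Nat) : Int) + 1) := by
        simp only [pvStepSlice, hslice, pvMkStrip]
      rw [hstep]
      have hpre' : ((pre.length + cur.length + 0 : Nat) : Int) + 1
          = (((pre ++ cur ++ [c]).length : Nat) : Int) := by
        simp only [List.length_append, List.length_cons, List.length_nil]
        push_cast
        ring
      rw [hpre']
      have hih := ih 0 (pre ++ cur ++ [c]) [] (parts ++ [pvMkStrip cur])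
        (by rw [hf]; simp)
      rw [List.map_map]
      have hfn : ((fun k => ((pre.length + cur.length + k : Nat) : Int)) ∘ (· + 1))
          = (fun k => (((pre ++ cur ++ [c]).length + List.length ([] : List Char) + k : Nat) : Int)) := by
        funext k
        simp only [Function.comp_apply, List.length_append, List.length_cons, List.length_nil]
        congr 1
        omega
      rw [hfn]
      rw [pvAttach_nil] at hih
      rcases hx : pvSegs 0 cs with ⟨ps, l⟩
      rw [hx] at hih
      simpa [pvAttach] using hih
    · have hih := ih d pre (cur ++ [c]) parts (by rw [hf]; simp)
      rw [List.map_map]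
      have hfn : ((fun k => ((pre.length + cur.length + k : Nat) : Int)) ∘ (· + 1))
          = (fun k => ((pre.length + (cur ++ [c]).length + k : Nat) : Int)) := by
        funext k
        simp only [Function.comp_apply, List.length_append, List.length_cons, List.length_nil]
        congr 1
        omega
      rw [hfn]
      simpa [pvAttach_attach] using hih

-- corollaries of the invariants at the ports' initial states
lemma pvA0 (t : List Char) :
    t.foldl pvStepA ([], 0, []) = ((pvSegs 0 t).1.map pvMkStrip, pvBal t, (pvSegs 0 t).2) := by
  have h := pvA_inv t [] 0 []
  simpa [pvAttach_nil] using h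

lemma pvB_bounds0 (t : List Char) :
    (PySem.List.enumerate t 0).foldl pvStepBounds ([], 0)
      = ((pvRelB 0 t).map (fun k : Nat => (k : Int)), pvBal t) := by
  have h := pvB_bounds t 0 [] 0
  simp only [Nat.cast_zero, zero_add, List.nil_append] at h
  exact h

lemma pvB_slices0 (t : List Char) :
    ((pvRelB 0 t).map (fun k : Nat => (k : Int))).foldl (pvStepSlice t) ([], 0)
      = ((pvSegs 0 t).1.map pvMkStrip, ((t.length - (pvSegs 0 t).2.length : Nat) : Int)) := by
  have h := pvB_slices t t 0 [] [] [] (by simp)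
  simp only [pvAttach_nil, List.length_nil, Nat.cast_zero, zero_add, List.nil_append] at h
  exact h

lemma pvLastSlice (t : List Char) :
    PySem.List.slice t (some ((t.length - (pvSegs 0 t).2.length : Nat) : Int)) none
      = (pvSegs 0 t).2 := by
  set L := (pvSegs 0 t).2 with hL
  obtain ⟨u, hu⟩ := (pvSegs_suffix t 0).1
  rw [← hL] at hu
  have hlen : t.length = u.length + L.length := by rw [← hu]; simp
  have h1 : t.length - L.length = u.length := by omega
  rw [PySem.List.slice_from_natCast, h1, ← hu, List.drop_left]

-- ===== VERDICT (by name: the statement is the Claim_ definition above) =====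
theorem split_clauses_py_spec : Claim_equal_split_clauses_py := by
  intro text _
  unfold Spec_split_clauses_py split_clauses_py split_clauses_py_alt
  simp only [pvA0, pvB_bounds0, pvB_slices0, pvLastSlice]
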